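-- pv_equiv track=rewrite | github.com/ckoons/BubbleSpacetimeTheory | play/toy_354_cycle_commitment.py | compute_beta1
-- ===== SOURCE A (Python) =====
-- def compute_beta1(adj, n, n_edges):
--     """β₁ = |E| - |V| + components."""
--     visited = [False] * n
--     components = 0
--     for start in range(n):
--         if visited[start]:
--             continue
--         components += 1
--         stack = [start]
--         while stack:
--             u = stack.pop()
--             if visited[u]:
--                 continue
--             visited[u] = True
--             for v in adj[u]:
--                 if not visited[v]:
--                     stack.append(v)
--     return n_edges - n + components
-- ===== SOURCE B (Python) =====
-- def compute_beta1(adj, n, n_edges):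
--     """beta1 = |E| - |V| + components, components counted by BFS (FIFO queue, mark-on-enqueue)."""
--     visited = [False] * n
--     components = 0
--     for start in range(n):
--         if visited[start]:
--             continue
--         components += 1
--         visited[start] = True
--         queue = [start]
--         while queue:
--             u = queue.pop(0)
--             for v in adj[u]:
--                 if not visited[v]:
--                     visited[v] = True
--                     queue.append(v)
--     return n_edges - n + components
-- ===== Notes on version B (the rewrite author's own statement) =====
-- stated objective: alternative
-- what changed: A counts components with an iterative stack DFS that pushes raw neighbour indices and re-checks visited at pop time; B counts them with a FIFO-queue BFS that marks vertices at enqueue time, so no vertex enters the frontier twice.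
-- outside the precondition, e.g. on compute_beta1([[2, -2, 3], [], [1], [], [1]], 4, 0): A returns -2, B returns -3; on compute_beta1([[1, -1], [-3, 6, -4], []], 2, 0): A returns -1, B raises IndexError
import Mathlib
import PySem

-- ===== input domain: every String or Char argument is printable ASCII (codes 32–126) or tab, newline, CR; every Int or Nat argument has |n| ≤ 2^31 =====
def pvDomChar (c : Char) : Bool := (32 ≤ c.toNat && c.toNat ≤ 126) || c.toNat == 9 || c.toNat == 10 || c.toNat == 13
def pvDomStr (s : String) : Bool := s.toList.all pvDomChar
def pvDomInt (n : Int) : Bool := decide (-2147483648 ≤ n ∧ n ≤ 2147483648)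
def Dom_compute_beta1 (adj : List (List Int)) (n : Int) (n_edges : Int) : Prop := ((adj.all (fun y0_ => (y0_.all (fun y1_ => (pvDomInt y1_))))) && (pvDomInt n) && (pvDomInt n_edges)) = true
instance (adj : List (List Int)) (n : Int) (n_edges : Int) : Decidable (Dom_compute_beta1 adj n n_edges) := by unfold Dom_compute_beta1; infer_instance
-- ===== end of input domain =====

-- B replaces A's stack DFS (push raw neighbours, re-check visited at pop) by a FIFO-queue BFS that
-- marks vertices at enqueue time, so no vertex ever enters the frontier twice; same value, no speed claim.

-- ===== PORT A =====
-- termination helper for the DFS loop: marking an unvisited cell strictly decreases the number of `false`s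
theorem pvCountFalse_set_lt (l : List Bool) (k : Nat) (hk : k < l.length) (hf : l[k] = false) :
    (l.set k true).count false < l.count false := by
  induction l generalizing k with
  | nil => simp at hk
  | cons a t ih =>
    cases k with
    | zero =>
      simp only [List.getElem_cons_zero] at hf
      subst hf
      simp
    | succ k =>
      simp only [List.length_cons, Nat.succ_lt_succ_iff] at hk
      simp only [List.getElem_cons_succ] at hf
      have h := ih k hk hf
      simp only [List.set_cons_succ, List.count_cons]
      omega

theorem pvCF_set_lt (V : List Bool) (u : Int)
    (h : (PySem.List.pyGet? V u).getD true = false) :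
    (PySem.List.pySetD V u true).count false < V.count false := by
  unfold PySem.List.pyGet? at h
  unfold PySem.List.pySetD PySem.List.pySet?
  cases e : PySem.List.pyIdx? V.length u with
  | none => rw [e] at h; simp at h
  | some k =>
    cases ek : V[k]? with
    | none => rw [e] at h; simp [ek] at h
    | some b =>
      rw [e] at h
      simp only [Option.bind_some, ek, Option.getD_some] at h
      obtain ⟨hk, hvk⟩ := List.getElem?_eq_some_iff.mp ek
      simp only [Option.map_some, Option.getD_some]
      exact pvCountFalse_set_lt V k hk (by rw [hvk, h])

-- A: iterative DFS with an explicit stack; `stack.pop()` takes the LAST element, so the stack is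
-- modelled head-as-top (Python appends `adj[u]`'s unvisited neighbours at the top end, which is a
-- reversed prepend in this representation).
def pvDfs (adj : List (List Int)) : List Bool → List Int → List Bool
  | visited, [] => visited
  | visited, u :: stk =>
    if h : (PySem.List.pyGet? visited u).getD true = true then
      pvDfs adj visited stk
    else
      pvDfs adj (PySem.List.pySetD visited u true)
        ((((PySem.List.pyGet? adj u).getD []).filter
            (fun v => !((PySem.List.pyGet? (PySem.List.pySetD visited u true) v).getD true))).reverse ++ stk)
termination_by visited stk => (visited.count false, stk.length)
decreasing_by
  · exact Prod.Lex.right _ (Nat.lt_succ_self _)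
  · exact Prod.Lex.left _ _ (pvCF_set_lt visited u (by simpa using h))

def compute_beta1 (adj : List (List Int)) (n : Int) (n_edges : Int) : Int :=
  n_edges - n +
    ((PySem.List.pyRange 0 n 1).foldl
      (fun (st : List Bool × Int) start =>
        if (PySem.List.pyGet? st.1 start).getD true = true then st
        else (pvDfs adj st.1 [start], st.2 + 1))
      (List.replicate n.toNat false, 0)).2

-- ===== PORT B =====
-- one step of B's inner `for v in adj[u]` loop: mark-and-enqueue each not-yet-visited neighbour
def pvBfsStep (st : List Bool × List Int) (v : Int) : List Bool × List Int :=
  if (PySem.List.pyGet? st.1 v).getD true = true then st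
  else (PySem.List.pySetD st.1 v true, st.2 ++ [v])

-- termination helper: the inner fold either leaves the state unchanged or marks a new cell
theorem pvBfsFold_term (row : List Int) :
    ∀ (V : List Bool) (q : List Int),
      row.foldl pvBfsStep (V, q) = (V, q) ∨
        (row.foldl pvBfsStep (V, q)).1.count false < V.count false := by
  induction row with
  | nil => intro V q; left; rfl
  | cons v row ih =>
    intro V q
    simp only [List.foldl_cons]
    by_cases h : (PySem.List.pyGet? V v).getD true = true
    · have hstep : pvBfsStep (V, q) v = (V, q) := by simp [pvBfsStep, h]
      rw [hstep]; exact ih V q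
    · have hlt := pvCF_set_lt V v (by simpa using h)
      have hstep : pvBfsStep (V, q) v = (PySem.List.pySetD V v true, q ++ [v]) := by
        simp [pvBfsStep, h]
      rw [hstep]
      rcases ih (PySem.List.pySetD V v true) (q ++ [v]) with he | hl
      · right; rw [he]; exact hlt
      · right; exact hl.trans hlt

-- B: BFS; `queue.pop(0)` takes the FIRST element (head), new vertices are appended at the tail
def pvBfs (adj : List (List Int)) : List Bool → List Int → List Bool
  | visited, [] => visited
  | visited, u :: queue =>
    pvBfs adj
      (((PySem.List.pyGet? adj u).getD []).foldl pvBfsStep (visited, queue)).1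
      (((PySem.List.pyGet? adj u).getD []).foldl pvBfsStep (visited, queue)).2
termination_by visited queue => (visited.count false, queue.length)
decreasing_by
  rcases pvBfsFold_term ((PySem.List.pyGet? adj u).getD []) visited queue with he | hl
  · rw [he]; exact Prod.Lex.right _ (Nat.lt_succ_self _)
  · exact Prod.Lex.left _ _ hl

def compute_beta1_alt (adj : List (List Int)) (n : Int) (n_edges : Int) : Int :=
  n_edges - n +
    ((PySem.List.pyRange 0 n 1).foldl
      (fun (st : List Bool × Int) start =>
        if (PySem.List.pyGet? st.1 start).getD true = true then st
        else (pvBfs adj (PySem.List.pySetD st.1 start true) [start], st.2 + 1))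
      (List.replicate n.toNat false, 0)).2

-- ===== PRECONDITION & SPEC =====
-- an admissible neighbour entry: indexes `visited` (length n) without raising, and is only negative
-- when len(adj) = n, so Python's two wraparound bases (n for `visited`, len(adj) for `adj`) coincide
def pvOK (adj : List (List Int)) (n : Int) (v : Int) : Prop :=
  -n ≤ v ∧ v < n ∧ (v < 0 → (adj.length : Int) = n)

-- Pre_ excludes the inputs where A raises IndexError (too few adjacency rows, or a neighbour index
-- outside [-n, n)), and also inputs with a negative neighbour entry while len(adj) ≠ n, where A's
-- wraparound reads `visited` with base n but `adj` with base len(adj): there whether A raises and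
-- what it returns depend on the traversal order, an accident of A's implementation.
def Pre_compute_beta1 (adj : List (List Int)) (n : Int) (n_edges : Int) : Prop :=
  n ≤ (adj.length : Int) ∧ ∀ row ∈ adj.take n.toNat, ∀ v ∈ row, pvOK adj n v
instance (adj : List (List Int)) (n : Int) (n_edges : Int) :
    Decidable (Pre_compute_beta1 adj n n_edges) := by
  unfold Pre_compute_beta1 pvOK; infer_instance

def pvWitness_compute_beta1 : List (List Int) × Int × Int := ([[1], [0], []], 3, 2)

def Spec_compute_beta1 (adj : List (List Int)) (n : Int) (n_edges : Int) (out : Int) : Prop :=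
  out = compute_beta1_alt adj n n_edges
instance (adj : List (List Int)) (n : Int) (n_edges : Int) (out : Int) :
    Decidable (Spec_compute_beta1 adj n n_edges out) := by
  unfold Spec_compute_beta1; infer_instance

-- ===== CLAIM (what is proved, stated in full; the proofs are below) =====
def Claim_equal_compute_beta1 : Prop := ∀ (adj : List (List Int)) (n : Int) (n_edges : Int), Dom_compute_beta1 adj n n_edges → Pre_compute_beta1 adj n n_edges → Spec_compute_beta1 adj n n_edges (compute_beta1 adj n n_edges)

-- ===== LEMMAS AND PROOFS =====

-- the actual cell of `visited` (length n) that Python's possibly-negative index u denotes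
def pvNorm (n u : Int) : Nat := if u < 0 then (u + n).toNat else u.toNat

-- `visited[k]` as a Bool (all indices actually used are < length)
def pvTst (V : List Bool) (k : Nat) : Bool := V.getD k false

-- the edge relation of the graph both programs traverse (rows 0..n-1, targets normalised)
def pvEdge (adj : List (List Int)) (n : Int) (b c : Nat) : Prop :=
  ∃ row, (adj.take n.toNat)[b]? = some row ∧ ∃ v ∈ row, pvNorm n v = c

-- reachability through edges whose targets avoid `Av`
def pvReach (adj : List (List Int)) (n : Int) (Av : Nat → Prop) : Nat → Nat → Prop :=
  Relation.ReflTransGen (fun b c => pvEdge adj n b c ∧ ¬ Av c)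

theorem pvIdx_norm (len : Nat) (n u : Int) (hl : len = n.toNat) (h1 : -n ≤ u) (h2 : u < n) :
    PySem.List.pyIdx? len u = some (pvNorm n u) ∧ pvNorm n u < len := by
  unfold PySem.List.pyIdx? pvNorm
  by_cases h0 : 0 ≤ u
  · rw [if_pos h0, if_pos (by omega : u < (len : Int)), if_neg (by omega : ¬ u < 0)]
    exact ⟨rfl, by omega⟩
  · rw [if_neg h0, if_pos (by omega : -(len : Int) ≤ u), if_pos (by omega : u < 0)]
    constructor
    · congr 1; omega
    · omega

theorem pvNorm_lt (n v : Int) (h1 : -n ≤ v) (h2 : v < n) : pvNorm n v < n.toNat := by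
  unfold pvNorm; split_ifs <;> omega

theorem pvGet_tst (V : List Bool) (n u : Int) (d : Bool) (hl : V.length = n.toNat)
    (h1 : -n ≤ u) (h2 : u < n) :
    (PySem.List.pyGet? V u).getD d = pvTst V (pvNorm n u) := by
  obtain ⟨hi, hlt⟩ := pvIdx_norm V.length n u hl h1 h2
  unfold PySem.List.pyGet? pvTst
  rw [hi]
  simp [List.getD_eq_getElem?_getD, List.getElem?_eq_getElem hlt]

theorem pvSet_norm (V : List Bool) (n u : Int) (b : Bool) (hl : V.length = n.toNat)
    (h1 : -n ≤ u) (h2 : u < n) :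
    PySem.List.pySetD V u b = V.set (pvNorm n u) b := by
  obtain ⟨hi, _⟩ := pvIdx_norm V.length n u hl h1 h2
  unfold PySem.List.pySetD PySem.List.pySet?
  rw [hi]
  rfl

theorem pvRow_norm (adj : List (List Int)) (n u : Int) (hn : n ≤ (adj.length : Int))
    (hu : pvOK adj n u) :
    (adj.take n.toNat)[pvNorm n u]? = some ((PySem.List.pyGet? adj u).getD []) := by
  obtain ⟨h1, h2, h3⟩ := hu
  by_cases h0 : 0 ≤ u
  · have hnn : pvNorm n u = u.toNat := by unfold pvNorm; rw [if_neg (by omega)]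
    have hlt : u.toNat < n.toNat := by omega
    have hla : u.toNat < adj.length := by omega
    rw [hnn, List.getElem?_take_of_lt hlt]
    unfold PySem.List.pyGet? PySem.List.pyIdx?
    rw [if_pos h0, if_pos (by omega : u < (adj.length : Int))]
    simp [List.getElem?_eq_getElem hla]
  · have hlen : adj.length = n.toNat := by omega
    obtain ⟨hi, hlt⟩ := pvIdx_norm adj.length n u hlen h1 h2
    unfold PySem.List.pyGet?
    rw [hi, List.take_of_length_le (by omega)]
    simp [List.getElem?_eq_getElem hlt]

theorem pvTst_set (V : List Bool) (j k : Nat) (hj : j < V.length) :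
    pvTst (V.set j true) k = true ↔ pvTst V k = true ∨ k = j := by
  unfold pvTst
  simp only [List.getD_eq_getElem?_getD, List.getElem?_set]
  rcases eq_or_ne j k with rfl | hne
  · simp [hj]
  · rw [if_neg hne]
    constructor
    · exact fun h => .inl h
    · rintro (h | h)
      · exact h
      · exact absurd h.symm hne

theorem pvReach_mono (adj : List (List Int)) (n : Int) {Av Av' : Nat → Prop}
    (hm : ∀ x, Av x → Av' x) {a k : Nat} (h : pvReach adj n Av' a k) : pvReach adj n Av a k :=
  Relation.ReflTransGen.mono (fun _ c hbc => ⟨hbc.1, fun hc => hbc.2 (hm c hc)⟩) h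

theorem pvReach_congr (adj : List (List Int)) (n : Int) {Av Av' : Nat → Prop}
    (h : ∀ x, Av x ↔ Av' x) {a k : Nat} : pvReach adj n Av a k ↔ pvReach adj n Av' a k :=
  ⟨pvReach_mono adj n (fun x => (h x).mpr), pvReach_mono adj n (fun x => (h x).mp)⟩

theorem pvReach_split (adj : List (List Int)) (n : Int) (Av N : Nat → Prop) {a k : Nat}
    (h : pvReach adj n Av a k) :
    pvReach adj n (fun x => Av x ∨ N x) a k ∨
      ∃ c, N c ∧ ¬ Av c ∧ pvReach adj n (fun x => Av x ∨ N x) c k := by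
  induction h with
  | refl => exact .inl .refl
  | @tail b k hab hbk ih =>
    by_cases hN : N k
    · exact .inr ⟨k, hN, hbk.2, .refl⟩
    · rcases ih with h' | ⟨c, hc1, hc2, h'⟩
      · exact .inl (h'.tail ⟨hbk.1, by tauto⟩)
      · exact .inr ⟨c, hc1, hc2, h'.tail ⟨hbk.1, by tauto⟩⟩

theorem pvList_eq_of_tst (V W : List Bool) (hl : V.length = W.length)
    (h : ∀ k, pvTst V k = pvTst W k) : V = W := by
  apply List.ext_getElem hl
  intro i h1 h2
  have hk := h i
  unfold pvTst at hk
  simpa [List.getD_eq_getElem?_getD, List.getElem?_eq_getElem, h1, h2] using hk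

-- unfolding equations for the two loops
theorem pvDfs_nil (adj : List (List Int)) (visited : List Bool) :
    pvDfs adj visited [] = visited := by rw [pvDfs]

theorem pvDfs_cons (adj : List (List Int)) (visited : List Bool) (u : Int) (stk : List Int) :
    pvDfs adj visited (u :: stk) =
      if (PySem.List.pyGet? visited u).getD true = true then pvDfs adj visited stk
      else pvDfs adj (PySem.List.pySetD visited u true)
        ((((PySem.List.pyGet? adj u).getD []).filter
            (fun v => !((PySem.List.pyGet? (PySem.List.pySetD visited u true) v).getD true))).reverse ++ stk) := by
  rw [pvDfs]
  split_ifs <;> rfl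

theorem pvBfs_nil (adj : List (List Int)) (visited : List Bool) :
    pvBfs adj visited [] = visited := by rw [pvBfs]

theorem pvBfs_cons (adj : List (List Int)) (visited : List Bool) (u : Int) (queue : List Int) :
    pvBfs adj visited (u :: queue) =
      pvBfs adj
        (((PySem.List.pyGet? adj u).getD []).foldl pvBfsStep (visited, queue)).1
        (((PySem.List.pyGet? adj u).getD []).foldl pvBfsStep (visited, queue)).2 := by
  rw [pvBfs]

theorem pvDfs_char (adj : List (List Int)) (n : Int) (hPre : Pre_compute_beta1 adj n 0) :
    ∀ (V : List Bool) (S : List Int), V.length = n.toNat → (∀ s ∈ S, pvOK adj n s) →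
      (pvDfs adj V S).length = n.toNat ∧
      ∀ k, pvTst (pvDfs adj V S) k = true ↔ pvTst V k = true ∨
        ∃ s ∈ S, pvTst V (pvNorm n s) = false ∧
          pvReach adj n (fun x => pvTst V x = true) (pvNorm n s) k := by
  intro V S
  induction V, S using pvDfs.induct adj with
  | case1 visited =>
    intro hl _
    rw [pvDfs_nil]
    exact ⟨hl, fun k => by simp⟩
  | case2 visited u stk h ih =>
    intro hl hS
    obtain ⟨hlen, hch⟩ := ih hl (fun s hs => hS s (List.mem_cons_of_mem _ hs))
    have hu := hS u List.mem_cons_self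
    have htst : pvTst visited (pvNorm n u) = true := by
      rw [← pvGet_tst visited n u true hl hu.1 hu.2.1]; exact h
    rw [pvDfs_cons, if_pos h]
    refine ⟨hlen, fun k => ?_⟩
    rw [hch k]
    constructor
    · rintro (h' | ⟨s, hs, hf, hr⟩)
      · exact .inl h'
      · exact .inr ⟨s, List.mem_cons_of_mem _ hs, hf, hr⟩
    · rintro (h' | ⟨s, hs, hf, hr⟩)
      · exact .inl h'
      · rcases List.mem_cons.mp hs with rfl | hs'
        · rw [htst] at hf; cases hf
        · exact .inr ⟨s, hs', hf, hr⟩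
  | case3 visited u stk h ih =>
    intro hl hS
    rw [pvDfs_cons, if_neg h]
    set row := (PySem.List.pyGet? adj u).getD [] with hrowdef
    set V' := PySem.List.pySetD visited u true with hV'def
    set P := row.filter (fun v => !((PySem.List.pyGet? V' v).getD true)) with hPdef
    have hu := hS u List.mem_cons_self
    have hVu : pvTst visited (pvNorm n u) = false := by
      rw [← pvGet_tst visited n u true hl hu.1 hu.2.1]; simpa using h
    have hu'lt : pvNorm n u < n.toNat := pvNorm_lt n u hu.1 hu.2.1
    have hVset : V' = visited.set (pvNorm n u) true :=
      pvSet_norm visited n u true hl hu.1 hu.2.1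
    have hlen' : V'.length = n.toNat := by rw [hVset, List.length_set]; exact hl
    have hrow : (adj.take n.toNat)[pvNorm n u]? = some row :=
      pvRow_norm adj n u hPre.1 hu
    have hrowOK : ∀ v ∈ row, pvOK adj n v := hPre.2 _ (List.mem_of_getElem? hrow)
    have hPmem : ∀ v, v ∈ P ↔ v ∈ row ∧ pvTst V' (pvNorm n v) = false := by
      intro v
      rw [hPdef, List.mem_filter]
      constructor
      · rintro ⟨hv, hbv⟩
        have hOKv := hrowOK v hv
        refine ⟨hv, ?_⟩
        rw [← pvGet_tst V' n v true hlen' hOKv.1 hOKv.2.1]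
        simpa using hbv
      · rintro ⟨hv, hbv⟩
        have hOKv := hrowOK v hv
        refine ⟨hv, ?_⟩
        rw [← pvGet_tst V' n v true hlen' hOKv.1 hOKv.2.1] at hbv
        simp [hbv]
    have htstV' : ∀ k, pvTst V' k = true ↔ pvTst visited k = true ∨ k = pvNorm n u := by
      intro k; rw [hVset]; exact pvTst_set visited _ k (by rw [hl]; exact hu'lt)
    have hSrec : ∀ s ∈ P.reverse ++ stk, pvOK adj n s := by
      intro s hs
      rcases List.mem_append.mp hs with hs | hs
      · exact hrowOK s ((hPmem s).mp (List.mem_reverse.mp hs)).1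
      · exact hS s (List.mem_cons_of_mem _ hs)
    obtain ⟨hlen2, hch⟩ := ih hlen' hSrec
    refine ⟨hlen2, fun k => ?_⟩
    rw [hch k]
    have hmono : ∀ {a k' : Nat}, pvReach adj n (fun x => pvTst V' x = true) a k' →
        pvReach adj n (fun x => pvTst visited x = true) a k' :=
      fun h' => pvReach_mono adj n (fun x hx => (htstV' x).mpr (.inl hx)) h'
    have hsplit : ∀ {a k' : Nat}, pvReach adj n (fun x => pvTst visited x = true) a k' →
        pvReach adj n (fun x => pvTst V' x = true) a k' ∨
          pvReach adj n (fun x => pvTst V' x = true) (pvNorm n u) k' := by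
      intro a k' h'
      have hiff : ∀ x, (pvTst visited x = true ∨ x = pvNorm n u) ↔ pvTst V' x = true :=
        fun x => (htstV' x).symm
      rcases pvReach_split adj n _ (fun x => x = pvNorm n u) h' with h'' | ⟨c, hc1, _, h''⟩
      · exact .inl ((pvReach_congr adj n hiff).mp h'')
      · subst hc1; exact .inr ((pvReach_congr adj n hiff).mp h'')
    have hedge : ∀ v ∈ row, pvEdge adj n (pvNorm n u) (pvNorm n v) :=
      fun v hv => ⟨row, hrow, v, hv, rfl⟩
    have hhead : ∀ {k' : Nat}, pvReach adj n (fun x => pvTst V' x = true) (pvNorm n u) k' →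
        pvTst V' k' = true ∨ ∃ v ∈ P, pvReach adj n (fun x => pvTst V' x = true) (pvNorm n v) k' := by
      intro k' h'
      rcases Relation.ReflTransGen.cases_head h' with rfl | ⟨c, hc, h''⟩
      · exact .inl ((htstV' _).mpr (.inr rfl))
      · obtain ⟨⟨row', hrow', v, hv, rfl⟩, hnc⟩ := hc
        have hre := hrow.symm.trans hrow'
        obtain rfl := Option.some.inj hre
        refine .inr ⟨v, (hPmem v).mpr ⟨hv, by simpa using hnc⟩, h''⟩
    have fromU : ∀ {k' : Nat}, pvReach adj n (fun x => pvTst V' x = true) (pvNorm n u) k' →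
        pvTst V' k' = true ∨ ∃ s ∈ P.reverse ++ stk, pvTst V' (pvNorm n s) = false ∧
          pvReach adj n (fun x => pvTst V' x = true) (pvNorm n s) k' := by
      intro k' h'
      rcases hhead h' with hk' | ⟨v, hvP, hr''⟩
      · exact .inl hk'
      · exact .inr ⟨v, List.mem_append_left _ (List.mem_reverse.mpr hvP),
          ((hPmem v).mp hvP).2, hr''⟩
    constructor
    · rintro (hk | ⟨s, hs, hf, hr⟩)
      · rcases (htstV' k).mp hk with h1 | rfl
        · exact .inl h1
        · exact .inr ⟨u, List.mem_cons_self, hVu, .refl⟩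
      · rcases List.mem_append.mp hs with hsP | hstk
        · have hvP := (hPmem s).mp (List.mem_reverse.mp hsP)
          have hnsV : pvTst visited (pvNorm n s) = false := by
            by_cases hx : pvTst visited (pvNorm n s) = true
            · exact absurd ((htstV' _).mpr (.inl hx)) (by rw [hvP.2]; simp)
            · simpa using hx
          refine .inr ⟨u, List.mem_cons_self, hVu, ?_⟩
          refine Relation.ReflTransGen.head ⟨hedge s hvP.1, ?_⟩ (hmono hr)
          show ¬ pvTst visited (pvNorm n s) = true
          rw [hnsV]; simp
        · have hnsV : pvTst visited (pvNorm n s) = false := by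
            by_cases hx : pvTst visited (pvNorm n s) = true
            · exact absurd ((htstV' _).mpr (.inl hx)) (by rw [hf]; simp)
            · simpa using hx
          exact .inr ⟨s, List.mem_cons_of_mem _ hstk, hnsV, hmono hr⟩
    · rintro (hk | ⟨s, hs, hf, hr⟩)
      · exact .inl ((htstV' k).mpr (.inl hk))
      · rcases List.mem_cons.mp hs with rfl | hstk
        · rcases hsplit hr with hr' | hr'
          · exact fromU hr'
          · exact fromU hr'
        · rcases hsplit hr with hr' | hr'
          · by_cases hsu : pvTst V' (pvNorm n s) = true
            · have heqn : pvNorm n s = pvNorm n u := by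
                rcases (htstV' _).mp hsu with h1 | h2
                · rw [h1] at hf; cases hf
                · exact h2
              rw [heqn] at hr'
              exact fromU hr'
            · exact .inr ⟨s, List.mem_append_right _ hstk, by simpa using hsu, hr'⟩
          · exact fromU hr'

theorem pvFold_char (adj : List (List Int)) (n : Int) (row : List Int) :
    ∀ (V : List Bool) (q : List Int), V.length = n.toNat → (∀ v ∈ row, pvOK adj n v) →
      (row.foldl pvBfsStep (V, q)).1.length = n.toNat ∧
      (∀ k, pvTst (row.foldl pvBfsStep (V, q)).1 k = true ↔
          pvTst V k = true ∨ ∃ v ∈ row, pvNorm n v = k) ∧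
      ∃ nq, (row.foldl pvBfsStep (V, q)).2 = q ++ nq ∧
        (∀ v ∈ nq, v ∈ row ∧ pvTst V (pvNorm n v) = false) ∧
        (∀ v ∈ row, pvTst V (pvNorm n v) = false → ∃ w ∈ nq, pvNorm n w = pvNorm n v) := by
  induction row with
  | nil =>
    intro V q hl _
    refine ⟨hl, fun k => by simp, [], by simp, by simp, by simp⟩
  | cons v row ih =>
    intro V q hl hOKs
    have hOKv := hOKs v List.mem_cons_self
    have hg : (PySem.List.pyGet? V v).getD true = pvTst V (pvNorm n v) :=
      pvGet_tst V n v true hl hOKv.1 hOKv.2.1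
    simp only [List.foldl_cons]
    by_cases hv : pvTst V (pvNorm n v) = true
    · have hstep : pvBfsStep (V, q) v = (V, q) := by simp [pvBfsStep, hg, hv]
      rw [hstep]
      obtain ⟨h1, h2, nq, h3, h4, h5⟩ := ih V q hl (fun w hw => hOKs w (List.mem_cons_of_mem _ hw))
      refine ⟨h1, fun k => ?_, nq, h3,
        fun w hw => ⟨List.mem_cons_of_mem _ (h4 w hw).1, (h4 w hw).2⟩, ?_⟩
      · rw [h2 k]
        constructor
        · rintro (hx | ⟨w, hw, rfl⟩)
          · exact .inl hx
          · exact .inr ⟨w, List.mem_cons_of_mem _ hw, rfl⟩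
        · rintro (hx | ⟨w, hw, hnw⟩)
          · exact .inl hx
          · rcases List.mem_cons.mp hw with rfl | hw'
            · exact .inl (hnw ▸ hv)
            · exact .inr ⟨w, hw', hnw⟩
      · intro w hw hf
        rcases List.mem_cons.mp hw with rfl | hw'
        · rw [hf] at hv; cases hv
        · exact h5 w hw' hf
    · have hvf : pvTst V (pvNorm n v) = false := by simpa using hv
      have hstep : pvBfsStep (V, q) v = (PySem.List.pySetD V v true, q ++ [v]) := by
        simp [pvBfsStep, hg, hvf]
      rw [hstep]
      have hset : PySem.List.pySetD V v true = V.set (pvNorm n v) true :=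
        pvSet_norm V n v true hl hOKv.1 hOKv.2.1
      have hlt : pvNorm n v < n.toNat := pvNorm_lt n v hOKv.1 hOKv.2.1
      have hl1 : (PySem.List.pySetD V v true).length = n.toNat := by
        rw [hset, List.length_set]; exact hl
      have htset : ∀ k, pvTst (PySem.List.pySetD V v true) k = true ↔
          pvTst V k = true ∨ k = pvNorm n v := by
        intro k; rw [hset]; exact pvTst_set V _ k (by rw [hl]; exact hlt)
      obtain ⟨h1, h2, nq, h3, h4, h5⟩ :=
        ih (PySem.List.pySetD V v true) (q ++ [v]) hl1 (fun w hw => hOKs w (List.mem_cons_of_mem _ hw))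
      refine ⟨h1, fun k => ?_, v :: nq, by rw [h3, List.append_assoc]; rfl, ?_, ?_⟩
      · rw [h2 k]
        constructor
        · rintro (hx | ⟨w, hw, rfl⟩)
          · rcases (htset k).mp hx with hx' | rfl
            · exact .inl hx'
            · exact .inr ⟨v, List.mem_cons_self, rfl⟩
          · exact .inr ⟨w, List.mem_cons_of_mem _ hw, rfl⟩
        · rintro (hx | ⟨w, hw, hnw⟩)
          · exact .inl ((htset k).mpr (.inl hx))
          · rcases List.mem_cons.mp hw with rfl | hw'
            · exact .inl ((htset k).mpr (.inr hnw.symm))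
            · exact .inr ⟨w, hw', hnw⟩
      · rintro w hw
        rcases List.mem_cons.mp hw with rfl | hw'
        · exact ⟨List.mem_cons_self, hvf⟩
        · obtain ⟨hwrow, hwf⟩ := h4 w hw'
          refine ⟨List.mem_cons_of_mem _ hwrow, ?_⟩
          by_cases hx : pvTst V (pvNorm n w) = true
          · have : pvTst (PySem.List.pySetD V v true) (pvNorm n w) = true :=
              (htset _).mpr (.inl hx)
            rw [this] at hwf; cases hwf
          · simpa using hx
      · intro w hw hf
        rcases List.mem_cons.mp hw with hwv | hw'
        · exact ⟨v, List.mem_cons_self, by rw [hwv]⟩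
        · by_cases hx : pvTst (PySem.List.pySetD V v true) (pvNorm n w) = true
          · rcases (htset _).mp hx with h' | h'
            · rw [h'] at hf; cases hf
            · exact ⟨v, List.mem_cons_self, h'.symm⟩
          · obtain ⟨w', hw'', he⟩ := h5 w hw' (by simpa using hx)
            exact ⟨w', List.mem_cons_of_mem _ hw'', he⟩

theorem pvBfs_char (adj : List (List Int)) (n : Int) (hPre : Pre_compute_beta1 adj n 0) :
    ∀ (V : List Bool) (Q : List Int), V.length = n.toNat →
      (∀ q ∈ Q, pvOK adj n q ∧ pvTst V (pvNorm n q) = true) →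
      (pvBfs adj V Q).length = n.toNat ∧
      ∀ k, pvTst (pvBfs adj V Q) k = true ↔ pvTst V k = true ∨
        ∃ q ∈ Q, pvReach adj n (fun x => pvTst V x = true) (pvNorm n q) k := by
  intro V Q
  induction V, Q using pvBfs.induct adj with
  | case1 visited =>
    intro hl _
    rw [pvBfs_nil]
    exact ⟨hl, fun k => by simp⟩
  | case2 visited u queue ih =>
    intro hl hQ
    rw [pvBfs_cons]
    set row := (PySem.List.pyGet? adj u).getD [] with hrowdef
    obtain ⟨hOKu, hMu⟩ := hQ u List.mem_cons_self
    have hrow : (adj.take n.toNat)[pvNorm n u]? = some row :=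
      pvRow_norm adj n u hPre.1 hOKu
    have hrowOK : ∀ v ∈ row, pvOK adj n v := hPre.2 _ (List.mem_of_getElem? hrow)
    obtain ⟨h1, h2, nq, h3, h4, h5⟩ := pvFold_char adj n row visited queue hl hrowOK
    set F := row.foldl pvBfsStep (visited, queue) with hFdef
    have hQ1 : ∀ q ∈ F.2, pvOK adj n q ∧ pvTst F.1 (pvNorm n q) = true := by
      rw [h3]
      intro q hq
      rcases List.mem_append.mp hq with hq | hq
      · obtain ⟨hOK, hM⟩ := hQ q (List.mem_cons_of_mem _ hq)
        exact ⟨hOK, (h2 _).mpr (.inl hM)⟩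
      · obtain ⟨hqrow, hqf⟩ := h4 q hq
        exact ⟨hrowOK q hqrow, (h2 _).mpr (.inr ⟨q, hqrow, rfl⟩)⟩
    obtain ⟨hlen2, hch⟩ := ih h1 hQ1
    refine ⟨hlen2, fun k => ?_⟩
    rw [hch k]
    have hedge : ∀ v ∈ row, pvEdge adj n (pvNorm n u) (pvNorm n v) :=
      fun v hv => ⟨row, hrow, v, hv, rfl⟩
    have hnoexit : ∀ {k' : Nat}, pvReach adj n (fun x => pvTst F.1 x = true) (pvNorm n u) k' →
        k' = pvNorm n u := by
      intro k' h'
      rcases Relation.ReflTransGen.cases_head h' with rfl | ⟨c, hc, h''⟩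
      · rfl
      · obtain ⟨⟨row', hrow', v, hv, rfl⟩, hnc⟩ := hc
        have hre := hrow.symm.trans hrow'
        obtain rfl := Option.some.inj hre
        exact absurd ((h2 _).mpr (.inr ⟨v, hv, rfl⟩)) hnc
    constructor
    · rintro (hk | ⟨q, hq, hr⟩)
      · rcases (h2 k).mp hk with hk' | ⟨v, hv, rfl⟩
        · exact .inl hk'
        · by_cases hx : pvTst visited (pvNorm n v) = true
          · exact .inl hx
          · exact .inr ⟨u, List.mem_cons_self,
              Relation.ReflTransGen.single ⟨hedge v hv, by simpa using hx⟩⟩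
      · have hq' := hq
        rw [h3] at hq'
        have hmono : pvReach adj n (fun x => pvTst visited x = true) (pvNorm n q) k :=
          pvReach_mono adj n (fun x hx => (h2 x).mpr (.inl hx)) hr
        rcases List.mem_append.mp hq' with hq'' | hq''
        · exact .inr ⟨q, List.mem_cons_of_mem _ hq'', hmono⟩
        · obtain ⟨hqrow, hqf⟩ := h4 q hq''
          refine .inr ⟨u, List.mem_cons_self,
            Relation.ReflTransGen.head ⟨hedge q hqrow, ?_⟩ hmono⟩
          show ¬ pvTst visited (pvNorm n q) = true
          rw [hqf]; simp
    · rintro (hk | ⟨q, hq, hr⟩)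
      · exact .inl ((h2 k).mpr (.inl hk))
      · have hiff : ∀ x, (pvTst visited x = true ∨ ∃ v ∈ row, pvNorm n v = x) ↔
            pvTst F.1 x = true := fun x => (h2 x).symm
        rcases pvReach_split adj n _ (fun x => ∃ v ∈ row, pvNorm n v = x) hr
          with hr' | ⟨c, hc1, hc2, hr'⟩
        · have hr'' := (pvReach_congr adj n hiff).mp hr'
          rcases List.mem_cons.mp hq with rfl | hq'
          · have hke := hnoexit hr''
            rw [hke]
            exact .inl ((h2 _).mpr (.inl hMu))
          · exact .inr ⟨q, by rw [h3]; exact List.mem_append_left _ hq', hr''⟩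
        · obtain ⟨v, hv, rfl⟩ := hc1
          have hcf : pvTst visited (pvNorm n v) = false := by simpa using hc2
          obtain ⟨w, hw, hwe⟩ := h5 v hv hcf
          have hr'' := (pvReach_congr adj n hiff).mp hr'
          rw [← hwe] at hr''
          exact .inr ⟨w, by rw [h3]; exact List.mem_append_right _ hw, hr''⟩

-- one outer-loop step on an unvisited start: the DFS result equals the BFS result
theorem pvStart_eq (adj : List (List Int)) (n : Int) (hPre : Pre_compute_beta1 adj n 0)
    (V : List Bool) (s : Int) (hl : V.length = n.toNat) (h0 : 0 ≤ s) (hsn : s < n)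
    (hguard : pvTst V (pvNorm n s) = false) :
    pvDfs adj V [s] = pvBfs adj (PySem.List.pySetD V s true) [s] ∧
    (pvDfs adj V [s]).length = n.toNat := by
  have hOK : pvOK adj n s := ⟨by omega, hsn, by omega⟩
  have hs' : pvNorm n s < n.toNat := pvNorm_lt n s hOK.1 hOK.2.1
  have hset : PySem.List.pySetD V s true = V.set (pvNorm n s) true :=
    pvSet_norm V n s true hl hOK.1 hOK.2.1
  have hlen' : (PySem.List.pySetD V s true).length = n.toNat := by
    rw [hset, List.length_set]; exact hl
  have htset : ∀ k, pvTst (PySem.List.pySetD V s true) k = true ↔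
      pvTst V k = true ∨ k = pvNorm n s := by
    intro k; rw [hset]; exact pvTst_set V _ k (by rw [hl]; exact hs')
  obtain ⟨hA1, hA2⟩ := pvDfs_char adj n hPre V [s] hl
    (by intro x hx; rcases List.mem_singleton.mp hx with rfl; exact hOK)
  obtain ⟨hB1, hB2⟩ := pvBfs_char adj n hPre (PySem.List.pySetD V s true) [s] hlen'
    (by intro x hx; rcases List.mem_singleton.mp hx with rfl
        exact ⟨hOK, (htset _).mpr (.inr rfl)⟩)
  refine ⟨pvList_eq_of_tst _ _ (by rw [hA1, hB1]) (fun k => ?_), hA1⟩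
  have hiff : pvTst (pvDfs adj V [s]) k = true ↔
      pvTst (pvBfs adj (PySem.List.pySetD V s true) [s]) k = true := by
    rw [hA2 k, hB2 k]
    have hcg : ∀ x, (pvTst V x = true ∨ x = pvNorm n s) ↔
        pvTst (PySem.List.pySetD V s true) x = true := fun x => (htset x).symm
    constructor
    · rintro (hk | ⟨x, hx, _, hr⟩)
      · exact .inl ((htset k).mpr (.inl hk))
      · have hxe := List.mem_singleton.mp hx
        rw [hxe] at hr
        rcases pvReach_split adj n _ (fun y => y = pvNorm n s) hr with hr' | ⟨c, hc1, _, hr'⟩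
        · exact .inr ⟨s, List.mem_singleton.mpr rfl, (pvReach_congr adj n hcg).mp hr'⟩
        · subst hc1
          exact .inr ⟨s, List.mem_singleton.mpr rfl, (pvReach_congr adj n hcg).mp hr'⟩
    · rintro (hk | ⟨x, hx, hr⟩)
      · rcases (htset k).mp hk with hk' | rfl
        · exact .inl hk'
        · exact .inr ⟨s, List.mem_singleton.mpr rfl, hguard, .refl⟩
      · have hxe := List.mem_singleton.mp hx
        rw [hxe] at hr
        refine .inr ⟨s, List.mem_singleton.mpr rfl, hguard, ?_⟩
        exact pvReach_mono adj n (fun x hx' => (htset x).mpr (.inl hx')) hr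
  exact Bool.eq_iff_iff.mpr (by simpa using hiff)

theorem pvOuter (adj : List (List Int)) (n : Int) (hPre : Pre_compute_beta1 adj n 0) :
    ∀ (starts : List Int) (V : List Bool) (c : Int),
      V.length = n.toNat → (∀ s ∈ starts, 0 ≤ s ∧ s < n) →
      (starts.foldl (fun (st : List Bool × Int) start =>
          if (PySem.List.pyGet? st.1 start).getD true = true then st
          else (pvDfs adj st.1 [start], st.2 + 1)) (V, c)) =
      (starts.foldl (fun (st : List Bool × Int) start =>
          if (PySem.List.pyGet? st.1 start).getD true = true then st
          else (pvBfs adj (PySem.List.pySetD st.1 start true) [start], st.2 + 1)) (V, c)) ∧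
      (starts.foldl (fun (st : List Bool × Int) start =>
          if (PySem.List.pyGet? st.1 start).getD true = true then st
          else (pvDfs adj st.1 [start], st.2 + 1)) (V, c)).1.length = n.toNat := by
  intro starts
  induction starts with
  | nil => intro V c hl _; exact ⟨rfl, hl⟩
  | cons s starts ih =>
    intro V c hl hb
    obtain ⟨h0, hsn⟩ := hb s List.mem_cons_self
    have hOK : pvOK adj n s := ⟨by omega, hsn, by omega⟩
    have hg : (PySem.List.pyGet? V s).getD true = pvTst V (pvNorm n s) :=
      pvGet_tst V n s true hl hOK.1 hOK.2.1
    simp only [List.foldl_cons]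
    by_cases hv : pvTst V (pvNorm n s) = true
    · rw [if_pos (by rw [hg]; exact hv), if_pos (by rw [hg]; exact hv)]
      exact ih V c hl (fun x hx => hb x (List.mem_cons_of_mem _ hx))
    · have hvf : pvTst V (pvNorm n s) = false := by simpa using hv
      rw [if_neg (by rw [hg, hvf]; simp), if_neg (by rw [hg, hvf]; simp)]
      obtain ⟨heq, hlen⟩ := pvStart_eq adj n hPre V s hl h0 hsn hvf
      rw [← heq]
      exact ih _ _ hlen (fun x hx => hb x (List.mem_cons_of_mem _ hx))

-- ===== VERDICT (by name: the statement is the Claim_ definition above) =====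
theorem compute_beta1_spec : Claim_equal_compute_beta1 := by
  intro adj n n_edges _ hPre
  unfold Spec_compute_beta1 compute_beta1 compute_beta1_alt
  have hPre0 : Pre_compute_beta1 adj n 0 := hPre
  have hout := pvOuter adj n hPre0 (PySem.List.pyRange 0 n 1)
    (List.replicate n.toNat false) 0 (by simp)
    (fun s hs => by rw [PySem.List.mem_pyRange_one] at hs; exact hs)
  rw [hout.1]
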